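-- pv_equiv track=rewrite | github.com/moisose/Bases-De-Datos-ll | Proyecto2/docker/API/app/app.py | shortLyric
-- ===== SOURCE A (Python) =====
-- def shortLyric(lyric):
--     jumps = 0
--     index = len(lyric)
--
--     for i, char in enumerate(lyric):
--         if char == '\n':
--             jumps += 1
--             if jumps == 4:
--                 index = i
--                 break
--
--     return lyric[:index]
-- ===== SOURCE B (Python) =====
-- def shortLyric(lyric):
--     return '\n'.join(lyric.split('\n')[:4])
-- ===== Notes on version B (the rewrite author's own statement) =====
-- stated objective: idiomatic
-- what changed: Replaces the manual indexed scan with counter, break and slice by splitting on the newline separator, keeping the first four segments and joining them back.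
import Mathlib
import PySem

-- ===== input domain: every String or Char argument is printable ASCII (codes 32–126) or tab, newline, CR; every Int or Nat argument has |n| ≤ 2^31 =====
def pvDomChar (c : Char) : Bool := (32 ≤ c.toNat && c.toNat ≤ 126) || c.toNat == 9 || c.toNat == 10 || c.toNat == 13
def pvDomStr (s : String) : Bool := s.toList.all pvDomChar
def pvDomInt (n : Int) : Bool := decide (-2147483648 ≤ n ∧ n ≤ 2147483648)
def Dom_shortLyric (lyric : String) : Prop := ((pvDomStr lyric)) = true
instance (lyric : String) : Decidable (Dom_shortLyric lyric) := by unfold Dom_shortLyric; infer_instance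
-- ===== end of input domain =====

-- B replaces A's indexed scan-and-break with the idiomatic split('\n')[:4] rejoined by '\n'.

-- ===== PORT A =====
-- the for-loop over enumerate(lyric): jumps counter, index register, break on the 4th '\n'
def pvLoopA : List (Int × Char) → Int → Int → Int
  | [], _, index => index
  | (i, c) :: rest, jumps, index =>
      if c = '\n' then
        let jumps := jumps + 1
        if jumps = 4 then i else pvLoopA rest jumps index
      else pvLoopA rest jumps index

def shortLyric (lyric : String) : String :=
  let index : Int := (lyric.toList.length : Int)
  let index := pvLoopA (PySem.List.enumerate lyric.toList 0) 0 index
  PySem.Str.slice lyric none (some index)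

-- ===== PORT B =====
-- lyric.split('\n') with its non-empty literal separator is PySem.Chars.splitOn (split? sep="\n" is 'some' of it)
def shortLyric_alt (lyric : String) : String :=
  PySem.Str.join "\n" (((PySem.Chars.splitOn lyric.toList ['\n']).map String.ofList).take 4)

-- ===== PRECONDITION & SPEC =====
def Spec_shortLyric (lyric : String) (out : String) : Prop := out = shortLyric_alt lyric
instance (lyric : String) (out : String) : Decidable (Spec_shortLyric lyric out) := by unfold Spec_shortLyric; infer_instance

-- ===== CLAIM (what is proved, stated in full; the proofs are below) =====
def Claim_equal_shortLyric : Prop := ∀ (lyric : String), Dom_shortLyric lyric → Spec_shortLyric lyric (shortLyric lyric)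

-- ===== LEMMAS AND PROOFS =====

-- the common reference function: the prefix of cs up to (excluding) its m-th newline
def pvTakeUntil (m : Nat) : List Char → List Char
  | [] => []
  | c :: rest => if c = '\n' then (if m = 1 then [] else c :: pvTakeUntil (m - 1) rest)
                 else c :: pvTakeUntil m rest

theorem pvTakeUntil_prefix (m : Nat) (cs : List Char) : pvTakeUntil m cs <+: cs := by
  induction cs generalizing m with
  | nil => simp [pvTakeUntil]
  | cons c rest ih =>
    simp only [pvTakeUntil]
    split_ifs with h1 h2
    · exact List.nil_prefix
    · exact List.cons_prefix_cons.mpr ⟨rfl, ih _⟩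
    · exact List.cons_prefix_cons.mpr ⟨rfl, ih _⟩

-- A's loop computes s + length of the prefix up to the (4 - jumps)-th newline
theorem pvLoopA_eq (cs : List Char) : ∀ (s : Int) (m : Nat), 1 ≤ m → m ≤ 4 →
    pvLoopA (PySem.List.enumerate cs s) (4 - (m : Int)) (s + cs.length)
      = s + (pvTakeUntil m cs).length := by
  induction cs with
  | nil => intro s m h1 h4; simp [PySem.List.enumerate_nil, pvLoopA, pvTakeUntil]
  | cons c rest ih =>
    intro s m h1 h4
    rw [PySem.List.enumerate_cons]
    by_cases hc : c = '\n'
    · subst hc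
      by_cases hm : m = 1
      · subst hm
        norm_num [pvLoopA, pvTakeUntil]
      · have hrec := ih (s + 1) (m - 1) (by omega) (by omega)
        have hcast : (4 : Int) - ((m - 1 : Nat) : Int) = (4 - (m : Int)) + 1 := by
          have : (1 : Nat) ≤ m := h1
          push_cast [this]; ring
        rw [hcast] at hrec
        simp only [pvLoopA, reduceIte]
        have hne : (4 - (m : Int)) + 1 ≠ 4 := by omega
        rw [if_neg hne]
        have harg : s + ((('\n' :: rest : List Char)).length : Int) = (s + 1) + (rest.length : Int) := by
          push_cast [List.length_cons]; ring
        rw [harg, hrec]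
        simp only [pvTakeUntil, reduceIte, if_neg hm, List.length_cons]
        push_cast; ring
    · have hrec := ih (s + 1) m h1 h4
      simp only [pvLoopA, if_neg hc]
      have harg : s + ((c :: rest).length : Int) = (s + 1) + (rest.length : Int) := by
        push_cast [List.length_cons]; ring
      rw [harg, hrec]
      simp only [pvTakeUntil, if_neg hc, List.length_cons]
      push_cast; ring

-- splitOn.go with enough fuel is the structural splitter pvSplit
def pvSplit (pre : List Char) : List Char → List (List Char)
  | [] => [pre]
  | c :: rest => if c = '\n' then pre :: pvSplit [] rest else pvSplit (pre ++ [c]) rest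

theorem pvSplit_ne_nil (pre cs : List Char) : pvSplit pre cs ≠ [] := by
  cases cs with
  | nil => simp [pvSplit]
  | cons c rest =>
    simp only [pvSplit]
    split_ifs with h
    · simp
    · exact pvSplit_ne_nil _ _

theorem pvSplitOn_go_eq (fuel : Nat) : ∀ (l cur : List Char) (acc : List (List Char)),
    l.length < fuel →
    PySem.Chars.splitOn.go ['\n'] fuel l cur acc = acc.reverse ++ pvSplit cur.reverse l := by
  induction fuel with
  | zero => intro l cur acc h; omega
  | succ f ih =>
    intro l cur acc h
    cases l with
    | nil => simp [PySem.Chars.splitOn.go, pvSplit]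
    | cons c rest =>
      by_cases hc : c = '\n'
      · subst hc
        have hpre : List.isPrefixOf ['\n'] ('\n' :: rest) = true := by
          simp [List.isPrefixOf]
        rw [show PySem.Chars.splitOn.go ['\n'] (f + 1) ('\n' :: rest) cur acc
              = PySem.Chars.splitOn.go ['\n'] f (List.drop (['\n'] : List Char).length ('\n' :: rest)) [] (cur.reverse :: acc) from by
              simp [PySem.Chars.splitOn.go, hpre]]
        simp only [List.length_singleton, List.drop_succ_cons, List.drop_zero]
        rw [ih rest [] (cur.reverse :: acc) (by simpa using Nat.lt_of_succ_lt_succ h)]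
        simp [pvSplit]
      · have hpre : List.isPrefixOf ['\n'] (c :: rest) = false := by
          simp [List.isPrefixOf]; exact fun hh => absurd hh.symm hc
        rw [show PySem.Chars.splitOn.go ['\n'] (f + 1) (c :: rest) cur acc
              = PySem.Chars.splitOn.go ['\n'] f rest (c :: cur) acc from by
              simp [PySem.Chars.splitOn.go, hpre]]
        rw [ih rest (c :: cur) acc (by simpa using Nat.lt_of_succ_lt_succ h)]
        simp [pvSplit, hc]

theorem pvSplitOn_eq (cs : List Char) : PySem.Chars.splitOn cs ['\n'] = pvSplit [] cs := by
  unfold PySem.Chars.splitOn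
  rw [pvSplitOn_go_eq (cs.length + 1) cs [] [] (by omega)]
  simp

-- joining the first m pieces of the splitter gives the prefix up to the m-th newline
theorem pvJoin_take (cs : List Char) : ∀ (pre : List Char) (m : Nat), 1 ≤ m →
    PySem.Chars.join ['\n'] ((pvSplit pre cs).take m) = pre ++ pvTakeUntil m cs := by
  induction cs with
  | nil =>
    intro pre m h1
    cases m with
    | zero => omega
    | succ k => simp [pvSplit, pvTakeUntil, PySem.Chars.join, List.intercalate]
  | cons c rest ih =>
    intro pre m h1
    by_cases hc : c = '\n'
    · subst hc
      by_cases hm : m = 1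
      · subst hm
        simp [pvSplit, pvTakeUntil, PySem.Chars.join, List.intercalate]
      · simp only [pvSplit, reduceIte, pvTakeUntil, if_neg hm]
        obtain ⟨k, rfl⟩ : ∃ k, m = k + 1 := ⟨m - 1, by omega⟩
        rw [List.take_succ_cons]
        have hk1 : 1 ≤ k := by omega
        have hne : (pvSplit [] rest).take k ≠ [] := by
          cases hs : pvSplit [] rest with
          | nil => exact absurd hs (pvSplit_ne_nil _ _)
          | cons a as => cases k with | zero => omega | succ j => simp
        rw [show PySem.Chars.join ['\n'] (pre :: (pvSplit [] rest).take k)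
              = pre ++ '\n' :: PySem.Chars.join ['\n'] ((pvSplit [] rest).take k) from by
              unfold PySem.Chars.join
              cases hs : (pvSplit [] rest).take k with
              | nil => exact absurd hs hne
              | cons a as => simp [List.intercalate, List.intersperse]]
        rw [ih [] k hk1]
        simp
    · simp only [pvSplit, pvTakeUntil, if_neg hc]
      rw [ih (pre ++ [c]) m h1]
      simp

-- ===== VERDICT (by name: the statement is the Claim_ definition above) =====
theorem shortLyric_spec : Claim_equal_shortLyric := by
  intro lyric _
  unfold Spec_shortLyric shortLyric shortLyric_alt
  have hA : pvLoopA (PySem.List.enumerate lyric.toList 0) 0 ((lyric.toList.length : Nat) : Int)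
      = (((pvTakeUntil 4 lyric.toList).length : Nat) : Int) := by
    simpa using pvLoopA_eq lyric.toList 0 4 (by omega) (by omega)
  apply String.toList_injective
  rw [PySem.Str.toList_join, PySem.Str.toList_slice]
  rw [hA, PySem.Chars.slice_eq_listSlice, PySem.List.slice_to_natCast]
  rw [show ("\n" : String).toList = ['\n'] from rfl]
  rw [← List.map_take, List.map_map]
  rw [show (String.toList ∘ String.ofList) = (id : List Char → List Char) from by
        funext x; simp, List.map_id]
  rw [pvSplitOn_eq, pvJoin_take lyric.toList [] 4 (by omega), List.nil_append]
  exact ((List.prefix_iff_eq_take).mp (pvTakeUntil_prefix 4 lyric.toList)).symm
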